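-- pv_equiv track=rewrite | github.com/ivs-rodin/leetcode | 726.py | countOfAtoms
-- ===== SOURCE A (Python) =====
-- def countOfAtoms(formula):
--     """
--     :type formula: str
--     :rtype: str
--     """
--     resD = {}
--     mul = [1]
--     mulStr = ''
--     curF = ''
--     cMul = 1
--     for c in formula[::-1]:
--         if c.isdigit():
--             mulStr = c+mulStr
--         else:
--             if c == ')':
--                 if len(mulStr):
--                     mul.append(mul[-1]*int(mulStr))
--                     mulStr = ''
--                 else:
--                     mul.append(mul[-1])
--             elif c == '(':
--                 mul = mul[:-1]
--             else:
--                 curF = c+curF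
--                 if c.isupper():
--                     if len(mulStr):
--                         cMul = int(mulStr)
--                     if curF in resD:
--                         resD[curF] += mul[-1]*cMul
--                     else:
--                         resD[curF] = mul[-1]*cMul
--                     cMul = 1
--                     curF = ''
--                     mulStr = ''
--     result = ''
--     for k,v in sorted(resD.items()):
--         result += k+(str(v) if v > 1 else '')
--     return result
-- ===== SOURCE B (Python) =====
-- def countOfAtoms(formula):
--     """
--     :type formula: str
--     :rtype: str
--     """
--     # Right-to-left scan with a stack of per-group count dicts: each group's
--     # counts stay unscaled next to the group's own multiplier and are scaled
--     # and merged into the enclosing dict only when the group is closed by '('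
--     # (deferred scaling), instead of A's running multiplier-product stack with
--     # immediate inserts into one global dict. An unmatched '(' closes nothing;
--     # groups still open at the end are cascaded down before formatting.
--     stack = [({}, 1)]
--     num = ''
--     name = ''
--     for c in formula[::-1]:
--         if c.isdigit():
--             num = c + num
--         elif c == ')':
--             stack.append(({}, int(num) if num else 1))
--             num = ''
--         elif c == '(':
--             if len(stack) > 1:
--                 d, k = stack.pop()
--                 dst = stack[-1][0]
--                 for nm, v in d.items():
--                     dst[nm] = dst.get(nm, 0) + v * k
--         else:
--             name = c + name
--             if c.isupper():
--                 cnt = int(num) if num else 1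
--                 d = stack[-1][0]
--                 d[name] = d.get(name, 0) + cnt
--                 num = ''
--                 name = ''
--     while len(stack) > 1:
--         d, k = stack.pop()
--         dst = stack[-1][0]
--         for nm, v in d.items():
--             dst[nm] = dst.get(nm, 0) + v * k
--     result = ''
--     for k, v in sorted(stack[0][0].items()):
--         result += k + (str(v) if v > 1 else '')
--     return result
-- ===== Notes on version B (the rewrite author's own statement) =====
-- stated objective: alternative
-- what changed: Replaces A's running multiplier-product stack with immediate multiplied inserts into one global dict by a stack of per-group count dicts, each paired with its own multiplier, scaled and merged into the enclosing dict only when the group closes (and cascaded down at end of input).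
import Mathlib
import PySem

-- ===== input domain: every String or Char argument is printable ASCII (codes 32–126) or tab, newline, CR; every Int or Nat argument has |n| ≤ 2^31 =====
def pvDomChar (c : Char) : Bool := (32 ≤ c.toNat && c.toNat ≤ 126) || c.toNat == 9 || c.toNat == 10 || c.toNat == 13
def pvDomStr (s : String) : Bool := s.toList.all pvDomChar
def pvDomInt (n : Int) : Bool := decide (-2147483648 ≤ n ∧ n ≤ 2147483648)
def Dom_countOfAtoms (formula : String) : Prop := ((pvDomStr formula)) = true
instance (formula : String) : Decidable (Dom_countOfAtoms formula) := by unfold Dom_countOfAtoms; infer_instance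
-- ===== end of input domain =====

-- B replaces A's reversed scan with a running multiplier-product stack and immediate
-- inserts into one global dict by a reversed scan with a stack of per-group count dicts
-- whose scaling is deferred to the group's close (objective: alternative; equal cost).

-- int(s), total form: in both programs the argument is always a nonempty digit string,
-- on which PySem.Int.ofChars? returns `some`.
def pvInt (cs : List Char) : Int := (PySem.Int.ofChars? cs).getD 0

-- shared output formatting, 'for k,v in sorted(d.items()): result += k+(str(v) if v>1 else "")'.
-- sorted(d.items()) compares (str,int) pairs whose first components are DISTINCT dict keys,
-- so Python's tuple order is exactly the order by the key string (ties never occur).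
def pvFormat (d : PySem.Dict (List Char) Int) : String :=
  String.ofList ((PySem.List.sorted d.items (fun p => p.1)).foldl
    (fun r p => r ++ p.1 ++ (if 1 < p.2 then PySem.Int.toChars p.2 else [])) [])

-- ===== PORT A =====
structure PVAState where
  resD : PySem.Dict (List Char) Int
  mul : List Int
  mulStr : List Char
  curF : List Char
  cMul : Int

-- one iteration of A's 'for c in formula[::-1]' body; mul[-1] is PySem.List.pyGetD _ (-1) _
-- (an IndexError in Python exactly when mul = [], which Pre_ excludes).
def pvStepA (st : PVAState) (c : Char) : PVAState :=
  if PySem.Chars.isdigit c then { st with mulStr := c :: st.mulStr }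
  else if c = ')' then
    if st.mulStr ≠ [] then
      { st with mul := st.mul ++ [PySem.List.pyGetD st.mul (-1) 0 * pvInt st.mulStr], mulStr := [] }
    else { st with mul := st.mul ++ [PySem.List.pyGetD st.mul (-1) 0] }
  else if c = '(' then { st with mul := PySem.List.slice st.mul none (some (-1)) }
  else
    let curF := c :: st.curF
    if PySem.Chars.isupper c then
      let cMul := if st.mulStr ≠ [] then pvInt st.mulStr else st.cMul
      let resD :=
        if st.resD.contains curF then
          st.resD.insert curF (st.resD.getD curF 0 + PySem.List.pyGetD st.mul (-1) 0 * cMul)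
        else st.resD.insert curF (PySem.List.pyGetD st.mul (-1) 0 * cMul)
      { resD := resD, mul := st.mul, mulStr := [], curF := [], cMul := 1 }
    else { st with curF := curF }

-- formula[::-1] is the reversed character list (PySem.Str.slice?_none_none_neg_one)
def countOfAtoms (formula : String) : String :=
  pvFormat ((formula.toList.reverse.foldl pvStepA ⟨PySem.Dict.empty, [1], [], [], 1⟩).resD)

-- ===== PORT B =====
-- Source B's state: the stack of (group dict, group multiplier) pairs is kept TOP-FIRST
-- (python append/pop at the end ↔ cons/uncons at the head, stack[-1] ↔ head).
structure PVBState where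
  stack : List (PySem.Dict (List Char) Int × Int)
  num : List Char
  name : List Char

-- Source B's inner merge loop 'for nm, v in d.items(): dst[nm] = dst.get(nm, 0) + v * k'
def pvMergeInto (d : PySem.Dict (List Char) Int) (k : Int)
    (dst : PySem.Dict (List Char) Int) : PySem.Dict (List Char) Int :=
  d.items.foldl (fun dst p => dst.insert p.1 (dst.getD p.1 0 + p.2 * k)) dst

-- one iteration of Source B's 'for c in formula[::-1]' body
def pvStepB (st : PVBState) (c : Char) : PVBState :=
  if PySem.Chars.isdigit c then { st with num := c :: st.num }
  else if c = ')' then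
    let k : Int := if st.num ≠ [] then pvInt st.num else 1
    { st with stack := (PySem.Dict.empty, k) :: st.stack, num := [] }
  else if c = '(' then
    match st.stack with
    | (d, k) :: (dst, k') :: rest => { st with stack := (pvMergeInto d k dst, k') :: rest }
    | _ => st   -- 'if len(stack) > 1' fails: an unmatched '(' closes nothing
  else
    let name := c :: st.name
    if PySem.Chars.isupper c then
      let cnt : Int := if st.num ≠ [] then pvInt st.num else 1
      match st.stack with
      | (d, k) :: rest =>
          { st with
              stack := (d.insert name (d.getD name 0 + cnt), k) :: rest
              num := []
              name := [] }
      | [] => { st with name := name }   -- unreachable: the stack is never empty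
    else { st with name := name }

-- Source B's final 'while len(stack) > 1' cascade: repeatedly merge the scaled top
-- into the dict below it, i.e. fold that merge over the rest of the stack
def pvCascade (s : List (PySem.Dict (List Char) Int × Int)) : PySem.Dict (List Char) Int :=
  match s with
  | [] => PySem.Dict.empty           -- unreachable: the stack is never empty
  | p :: rest => (rest.foldl (fun top q => (pvMergeInto top.1 top.2 q.1, q.2)) p).1

def countOfAtoms_alt (formula : String) : String :=
  pvFormat (pvCascade
    ((formula.toList.reverse.foldl pvStepB ⟨[(PySem.Dict.empty, 1)], [], []⟩).stack))

-- ===== PRECONDITION & SPEC =====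
-- Pre_ holds exactly when A returns normally: it fails only where A raises IndexError
-- (mul[-1] on an empty list), i.e. when some ')' or uppercase letter has, strictly to
-- its right, more '(' than ')'. The fold below walks the string right to left keeping
-- l = A's multiplier-stack length ( ')' needs l ≥ 1 and pushes, '(' pops with floor 0,
-- an uppercase letter needs l ≥ 1).
def pvOkA : List Char → Nat → Bool
  | [], _ => true
  | c :: r, l =>
    if PySem.Chars.isdigit c then pvOkA r l
    else if c = ')' then decide (1 ≤ l) && pvOkA r (l + 1)
    else if c = '(' then pvOkA r (l - 1)
    else if PySem.Chars.isupper c then decide (1 ≤ l) && pvOkA r l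
    else pvOkA r l

def Pre_countOfAtoms (formula : String) : Prop := pvOkA formula.toList.reverse 1 = true

instance (formula : String) : Decidable (Pre_countOfAtoms formula) := by
  unfold Pre_countOfAtoms; infer_instance

def pvWitness_countOfAtoms : String := "K4(ON(SO3)2)2"

def Spec_countOfAtoms (formula : String) (out : String) : Prop := out = countOfAtoms_alt formula
instance (formula : String) (out : String) : Decidable (Spec_countOfAtoms formula out) := by
  unfold Spec_countOfAtoms; infer_instance

-- ===== CLAIM (what is proved, stated in full; the proofs are below) =====
def Claim_equal_countOfAtoms : Prop := ∀ (formula : String), Dom_countOfAtoms formula → Pre_countOfAtoms formula → Spec_countOfAtoms formula (countOfAtoms formula)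


-- ===== LEMMAS AND PROOFS =====

lemma pvContains_iff (d : PySem.Dict (List Char) Int) (k : List Char) :
    d.contains k = true ↔ k ∈ d.keys := by
  simp only [PySem.Dict.contains, PySem.Dict.keys, List.any_eq_true, List.mem_map, beq_iff_eq]

lemma pvGetD_of_not_contains (d : PySem.Dict (List Char) Int) (k : List Char)
    (h : d.contains k = false) : d.getD k 0 = 0 := by
  simp only [PySem.Dict.contains, List.any_eq_false] at h
  have : d.items.find? (fun p => p.1 == k) = none := List.find?_eq_none.mpr h
  simp [PySem.Dict.getD, PySem.Dict.get?, this]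

lemma pvKeys_insert (d : PySem.Dict (List Char) Int) (k : List Char) (v : Int) :
    (d.insert k v).keys = PySem.Set.add d.keys k := by
  have := PySem.Dict.keys_foldl_insert [k] (fun _ _ => v) d
  simpa [PySem.Set.update] using this

-- the single-element update both programs perform, with its three properties
lemma pvUpd (d : PySem.Dict (List Char) Int) (nm : List Char) (x : Int) :
    (∀ k, (d.insert nm (d.getD nm 0 + x)).getD k 0 = d.getD k 0 + (if k = nm then x else 0)) ∧
    (∀ k, (d.insert nm (d.getD nm 0 + x)).contains k = (d.contains k || decide (k = nm))) ∧
    (d.keys.Nodup → (d.insert nm (d.getD nm 0 + x)).keys.Nodup) := by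
  refine ⟨?_, ?_, ?_⟩
  · intro k
    by_cases hk : k = nm
    · subst hk; rw [PySem.Dict.getD_insert_self, if_pos rfl]
    · rw [PySem.Dict.getD_insert_of_ne _ _ _ hk, if_neg hk, add_zero]
  · intro k
    rw [PySem.Dict.contains_insert]
    cases hdk : d.contains k <;> by_cases hk : k = nm <;> simp [hk, hdk]
  · intro hnd
    rw [pvKeys_insert]
    exact PySem.Set.nodup_add _ _ hnd

lemma pvAIf (d : PySem.Dict (List Char) Int) (nm : List Char) (x : Int) :
    (if d.contains nm then d.insert nm (d.getD nm 0 + x) else d.insert nm x) =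
      d.insert nm (d.getD nm 0 + x) := by
  by_cases h : d.contains nm
  · rw [if_pos h]
  · rw [if_neg h, pvGetD_of_not_contains d nm (by simpa using h), zero_add]

lemma pvMerge (l : List (List Char × Int)) (kk : Int) :
    ∀ (dst : PySem.Dict (List Char) Int), (l.map Prod.fst).Nodup →
    (∀ x, (l.foldl (fun d p => d.insert p.1 (d.getD p.1 0 + p.2 * kk)) dst).getD x 0 =
        dst.getD x 0 + (match l.find? (fun p => p.1 == x) with | some p => p.2 | none => 0) * kk) ∧
    (∀ x, (l.foldl (fun d p => d.insert p.1 (d.getD p.1 0 + p.2 * kk)) dst).contains x =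
        (dst.contains x || l.any (fun p => p.1 == x))) ∧
    (dst.keys.Nodup → (l.foldl (fun d p => d.insert p.1 (d.getD p.1 0 + p.2 * kk)) dst).keys.Nodup) := by
  induction l with
  | nil =>
    intro dst _
    refine ⟨fun x => by simp, fun x => by simp, fun h => by simpa using h⟩
  | cons p t ih =>
    intro dst hnd
    have hp : p.1 ∉ t.map Prod.fst := (List.nodup_cons.mp hnd).1
    have hndt : (t.map Prod.fst).Nodup := (List.nodup_cons.mp hnd).2
    obtain ⟨ihv, ihc, ihn⟩ := ih (dst.insert p.1 (dst.getD p.1 0 + p.2 * kk)) hndt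
    refine ⟨?_, ?_, ?_⟩
    · intro x
      rw [List.foldl_cons, ihv x]
      by_cases hx : p.1 = x
      · subst hx
        have hfind : t.find? (fun q => q.1 == p.1) = none := by
          refine List.find?_eq_none.mpr ?_
          intro q hq
          simp only [beq_iff_eq]
          intro he
          exact hp (he ▸ List.mem_map_of_mem hq)
        rw [hfind, List.find?_cons_of_pos (by simp), PySem.Dict.getD_insert_self]
        ring
      · have hb : ((fun q : List Char × Int => q.1 == x) p) = false := by simpa using hx
        rw [List.find?_cons_of_neg (by simp [hb]),
          PySem.Dict.getD_insert_of_ne dst (k := p.1) (k' := x)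
            (dst.getD p.1 0 + p.2 * kk) 0 (fun he => hx he.symm)]
    · intro x
      rw [List.foldl_cons, ihc x, PySem.Dict.contains_insert]
      simp only [List.any_cons]
      by_cases hx : x = p.1
      · subst hx; simp
      · have hb1 : (x == p.1) = false := by simpa using hx
        have hb2 : (p.1 == x) = false := by simpa using fun he => hx he.symm
        simp [hb1, hb2]
    · intro hnd0
      rw [List.foldl_cons]
      exact ihn (by rw [pvKeys_insert]; exact PySem.Set.nodup_add _ _ hnd0)

-- ========== output formatting depends only on the finite map ==========
-- the LT/DecidableLT instances picked in pvFormat agree with the LinearOrder ones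
lemma pvSortedInst (xs : List (List Char × Int)) :
    PySem.List.sorted xs (fun p => p.1) =
    @PySem.List.sorted (List Char × Int) (List Char) List.instLinearOrder.toLT
      LinearOrder.toDecidableLT xs (fun p => p.1) false := by
  congr 1

lemma pvFormat_congr (d1 d2 : PySem.Dict (List Char) Int)
    (h1 : d1.keys.Nodup) (h2 : d2.keys.Nodup)
    (hc : ∀ k, d1.contains k = d2.contains k)
    (hv : ∀ k, d1.getD k 0 = d2.getD k 0) : pvFormat d1 = pvFormat d2 := by
  have e1 := PySem.Dict.items_eq_map_keys d1 h1 (0 : Int)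
  have e2 := PySem.Dict.items_eq_map_keys d2 h2 (0 : Int)
  have hkperm : d1.keys.Perm d2.keys := by
    refine (List.perm_ext_iff_of_nodup h1 h2).mpr ?_
    intro k
    rw [← pvContains_iff, ← pvContains_iff, hc k]
  have hip : d1.items.Perm d2.items := by
    rw [e1, e2, List.map_congr_left (fun a _ => by rw [hv a] :
      ∀ a ∈ d1.keys, (a, d1.getD a 0) = (a, d2.getD a 0))]
    exact hkperm.map _
  have hpair := PySem.List.sorted_pairwise (κ := List Char) d1.items (fun p => p.1)
  have hSperm : (@PySem.List.sorted (List Char × Int) (List Char) List.instLinearOrder.toLT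
      LinearOrder.toDecidableLT d1.items (fun p => p.1) false).Perm d1.items := by
    rw [← pvSortedInst]
    exact PySem.List.sorted_perm d1.items (fun p => p.1) false
  have hk1 : d1.items.map (fun p : List Char × Int => p.1) = d1.keys := rfl
  have hnodS : ((@PySem.List.sorted (List Char × Int) (List Char) List.instLinearOrder.toLT
      LinearOrder.toDecidableLT d1.items (fun p => p.1) false).map
      (fun p : List Char × Int => p.1)).Nodup := by
    have hpm := (hSperm.map (fun p : List Char × Int => p.1)).symm
    rw [hk1] at hpm
    exact hpm.nodup h1
  have hlt : (@PySem.List.sorted (List Char × Int) (List Char) List.instLinearOrder.toLT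
      LinearOrder.toDecidableLT d1.items (fun p => p.1) false).Pairwise
      (fun a b => a.1 < b.1) := by
    have hne := List.pairwise_map.mp hnodS
    exact (hpair.and hne).imp (fun h => lt_of_le_of_ne h.1 h.2)
  have hs2 := PySem.List.sorted_eq_of_perm_of_pairwise_lt (κ := List Char) d2.items _
    (fun p : List Char × Int => p.1) (hSperm.trans hip) hlt
  unfold pvFormat
  rw [pvSortedInst d1.items, pvSortedInst d2.items, hs2]

-- ========== the simulation invariant between A's and B's states ==========

-- the multiplier product of the groups enclosing the top of B's stack (bottom worth 1)
def pvMlast : List (PySem.Dict (List Char) Int × Int) → Int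
  | [] => 1
  | [_] => 1
  | p :: rest => pvMlast rest * p.2

-- A's multiplier stack reconstructed from B's stack
def pvMulOf : List (PySem.Dict (List Char) Int × Int) → List Int
  | [] => []
  | [_] => [1]
  | p :: rest => pvMulOf rest ++ [pvMlast rest * p.2]

-- the total count a key has accumulated over the whole of B's stack (A's resD view)
def pvFlatV : List (PySem.Dict (List Char) Int × Int) → List Char → Int
  | [], _ => 0
  | [p], key => p.1.getD key 0
  | p :: rest, key => pvFlatV rest key + pvMlast rest * p.2 * p.1.getD key 0

def pvFlatC : List (PySem.Dict (List Char) Int × Int) → List Char → Bool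
  | [], _ => false
  | [p], key => p.1.contains key
  | p :: rest, key => pvFlatC rest key || p.1.contains key

def pvInv (a : PVAState) (b : PVBState) : Prop :=
  a.mulStr = b.num ∧ a.curF = b.name ∧ a.cMul = 1 ∧ b.stack ≠ [] ∧
  (a.mul = pvMulOf b.stack ∨ (a.mul = [] ∧ ∃ p, b.stack = [p])) ∧
  (∀ key, a.resD.getD key 0 = pvFlatV b.stack key) ∧
  (∀ key, a.resD.contains key = pvFlatC b.stack key) ∧
  a.resD.keys.Nodup ∧ (∀ p ∈ b.stack, (p.1).keys.Nodup)

lemma pvMlast_cons (p q : PySem.Dict (List Char) Int × Int)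
    (rest : List (PySem.Dict (List Char) Int × Int)) :
    pvMlast (p :: q :: rest) = pvMlast (q :: rest) * p.2 := rfl

lemma pvMulOf_cons (p : PySem.Dict (List Char) Int × Int)
    (rest : List (PySem.Dict (List Char) Int × Int)) (h : rest ≠ []) :
    pvMulOf (p :: rest) = pvMulOf rest ++ [pvMlast rest * p.2] := by
  cases rest with
  | nil => exact absurd rfl h
  | cons q t => rfl

lemma pvMulOf_getLast? (s : List (PySem.Dict (List Char) Int × Int)) (h : s ≠ []) :
    (pvMulOf s).getLast? = some (pvMlast s) := by
  cases s with
  | nil => exact absurd rfl h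
  | cons p rest =>
    cases rest with
    | nil => rfl
    | cons q t =>
      rw [show pvMulOf (p :: q :: t) = pvMulOf (q :: t) ++ [pvMlast (q :: t) * p.2] from rfl,
        List.getLast?_concat, pvMlast_cons]

-- the head dict of the stack does not matter to the multipliers
lemma pvMulOf_head (d d' : PySem.Dict (List Char) Int) (k : Int)
    (rest : List (PySem.Dict (List Char) Int × Int)) :
    pvMulOf ((d, k) :: rest) = pvMulOf ((d', k) :: rest) := by
  cases rest <;> rfl

-- pvMergeInto through PySem.Dict.getD/contains (wraps pvMerge)
lemma pvMergeInto_props (d : PySem.Dict (List Char) Int) (k : Int)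
    (dst : PySem.Dict (List Char) Int) (hd : d.keys.Nodup) :
    (∀ x, (pvMergeInto d k dst).getD x 0 = dst.getD x 0 + d.getD x 0 * k) ∧
    (∀ x, (pvMergeInto d k dst).contains x = (dst.contains x || d.contains x)) ∧
    (dst.keys.Nodup → (pvMergeInto d k dst).keys.Nodup) := by
  obtain ⟨mv, mc, mn⟩ := pvMerge d.items k dst (by simpa [PySem.Dict.keys] using hd)
  refine ⟨?_, ?_, mn⟩
  · intro x
    rw [show pvMergeInto d k dst =
      d.items.foldl (fun dst p => dst.insert p.1 (dst.getD p.1 0 + p.2 * k)) dst from rfl, mv x]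
    have hmv : (match d.items.find? (fun p => p.1 == x) with
        | some p => p.2 | none => (0 : Int)) = d.getD x 0 := by
      cases hfx : d.items.find? (fun p => p.1 == x) <;>
        simp [PySem.Dict.getD, PySem.Dict.get?, hfx]
    rw [hmv]
  · intro x
    rw [show pvMergeInto d k dst =
      d.items.foldl (fun dst p => dst.insert p.1 (dst.getD p.1 0 + p.2 * k)) dst from rfl, mc x]
    rfl

-- closing the top group preserves the flattened view of the stack
lemma pvMergeStack (pd : PySem.Dict (List Char) Int) (pk : Int)
    (qd : PySem.Dict (List Char) Int) (qk : Int)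
    (rest : List (PySem.Dict (List Char) Int × Int))
    (hpd : pd.keys.Nodup) (hqd : qd.keys.Nodup) :
    (∀ key, pvFlatV ((pvMergeInto pd pk qd, qk) :: rest) key =
      pvFlatV ((pd, pk) :: (qd, qk) :: rest) key) ∧
    (∀ key, pvFlatC ((pvMergeInto pd pk qd, qk) :: rest) key =
      pvFlatC ((pd, pk) :: (qd, qk) :: rest) key) ∧
    (pvMergeInto pd pk qd).keys.Nodup := by
  obtain ⟨mv, mc, mn⟩ := pvMergeInto_props pd pk qd hpd
  refine ⟨?_, ?_, mn hqd⟩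
  · intro key
    cases rest with
    | nil =>
      rw [show pvFlatV [(pvMergeInto pd pk qd, qk)] key = (pvMergeInto pd pk qd).getD key 0
          from rfl, mv key]
      rw [show pvFlatV [(pd, pk), (qd, qk)] key =
        pvFlatV [(qd, qk)] key + pvMlast [(qd, qk)] * pk * pd.getD key 0 from rfl]
      rw [show pvFlatV [(qd, qk)] key = qd.getD key 0 from rfl,
        show pvMlast [(qd, qk)] = 1 from rfl]
      ring
    | cons r t =>
      rw [show pvFlatV ((pvMergeInto pd pk qd, qk) :: r :: t) key =
        pvFlatV (r :: t) key + pvMlast (r :: t) * qk * (pvMergeInto pd pk qd).getD key 0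
          from rfl, mv key]
      rw [show pvFlatV ((pd, pk) :: (qd, qk) :: r :: t) key =
        pvFlatV ((qd, qk) :: r :: t) key +
          pvMlast ((qd, qk) :: r :: t) * pk * pd.getD key 0 from rfl]
      rw [show pvFlatV ((qd, qk) :: r :: t) key =
        pvFlatV (r :: t) key + pvMlast (r :: t) * qk * qd.getD key 0 from rfl]
      rw [show pvMlast ((qd, qk) :: r :: t) = pvMlast (r :: t) * qk from rfl]
      ring
  · intro key
    cases rest with
    | nil =>
      rw [show pvFlatC [(pvMergeInto pd pk qd, qk)] key = (pvMergeInto pd pk qd).contains key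
          from rfl, mc key]
      rw [show pvFlatC [(pd, pk), (qd, qk)] key =
        (pvFlatC [(qd, qk)] key || pd.contains key) from rfl,
        show pvFlatC [(qd, qk)] key = qd.contains key from rfl]
    | cons r t =>
      rw [show pvFlatC ((pvMergeInto pd pk qd, qk) :: r :: t) key =
        (pvFlatC (r :: t) key || (pvMergeInto pd pk qd).contains key) from rfl, mc key]
      rw [show pvFlatC ((pd, pk) :: (qd, qk) :: r :: t) key =
        (pvFlatC ((qd, qk) :: r :: t) key || pd.contains key) from rfl,
        show pvFlatC ((qd, qk) :: r :: t) key = (pvFlatC (r :: t) key || qd.contains key)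
          from rfl]
      cases pvFlatC (r :: t) key <;> cases qd.contains key <;> cases pd.contains key <;> rfl

-- a commit into the top dict, seen through the flattened views
lemma pvFlat_insert_head (pd : PySem.Dict (List Char) Int) (pk : Int)
    (rest : List (PySem.Dict (List Char) Int × Int)) (nm : List Char) (cnt : Int) :
    (∀ key, pvFlatV ((pd.insert nm (pd.getD nm 0 + cnt), pk) :: rest) key =
      pvFlatV ((pd, pk) :: rest) key +
        (if key = nm then pvMlast ((pd, pk) :: rest) * cnt else 0)) ∧
    (∀ key, pvFlatC ((pd.insert nm (pd.getD nm 0 + cnt), pk) :: rest) key =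
      (pvFlatC ((pd, pk) :: rest) key || decide (key = nm))) := by
  obtain ⟨uv, uc, _⟩ := pvUpd pd nm cnt
  constructor
  · intro key
    cases rest with
    | nil =>
      rw [show pvFlatV [(pd.insert nm (pd.getD nm 0 + cnt), pk)] key =
        (pd.insert nm (pd.getD nm 0 + cnt)).getD key 0 from rfl, uv key]
      rw [show pvFlatV [(pd, pk)] key = pd.getD key 0 from rfl,
        show pvMlast [(pd, pk)] = 1 from rfl]
      by_cases hk : key = nm <;> simp [hk]
    | cons r t =>
      rw [show pvFlatV ((pd.insert nm (pd.getD nm 0 + cnt), pk) :: r :: t) key =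
        pvFlatV (r :: t) key +
          pvMlast (r :: t) * pk * (pd.insert nm (pd.getD nm 0 + cnt)).getD key 0 from rfl,
        uv key]
      rw [show pvFlatV ((pd, pk) :: r :: t) key =
        pvFlatV (r :: t) key + pvMlast (r :: t) * pk * pd.getD key 0 from rfl,
        show pvMlast ((pd, pk) :: r :: t) = pvMlast (r :: t) * pk from rfl]
      by_cases hk : key = nm <;> simp [hk] <;> ring
  · intro key
    cases rest with
    | nil =>
      rw [show pvFlatC [(pd.insert nm (pd.getD nm 0 + cnt), pk)] key =
        (pd.insert nm (pd.getD nm 0 + cnt)).contains key from rfl, uc key]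
      rfl
    | cons r t =>
      rw [show pvFlatC ((pd.insert nm (pd.getD nm 0 + cnt), pk) :: r :: t) key =
        (pvFlatC (r :: t) key || (pd.insert nm (pd.getD nm 0 + cnt)).contains key) from rfl,
        uc key]
      rw [show pvFlatC ((pd, pk) :: r :: t) key =
        (pvFlatC (r :: t) key || pd.contains key) from rfl]
      cases pvFlatC (r :: t) key <;> cases pd.contains key <;> simp

lemma pvCascade_single (d : PySem.Dict (List Char) Int) (k : Int) :
    pvCascade [(d, k)] = d := rfl

lemma pvCascade_cons (pd : PySem.Dict (List Char) Int) (pk : Int)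
    (qd : PySem.Dict (List Char) Int) (qk : Int)
    (rest : List (PySem.Dict (List Char) Int × Int)) :
    pvCascade ((pd, pk) :: (qd, qk) :: rest) =
      pvCascade ((pvMergeInto pd pk qd, qk) :: rest) := rfl

-- ========== the per-character simulation ==========
theorem pvSim : ∀ (cs : List Char) (a : PVAState) (b : PVBState), pvInv a b →
    pvOkA cs a.mul.length = true →
    pvInv (cs.foldl pvStepA a) (cs.foldl pvStepB b) := by
  intro cs
  induction cs with
  | nil => exact fun a b h _ => h
  | cons c r ih =>
    intro a b hinv hok
    obtain ⟨h1, h2, h3, h4, h5, h6, h7, h8, h9⟩ := hinv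
    simp only [List.foldl_cons]
    by_cases hd : PySem.Chars.isdigit c = true
    · rw [pvOkA, if_pos hd] at hok
      have hA : pvStepA a c = { a with mulStr := c :: a.mulStr } := by simp [pvStepA, hd]
      have hB : pvStepB b c = { b with num := c :: b.num } := by simp [pvStepB, hd]
      rw [hA, hB]
      exact ih _ _ ⟨by simp [h1], h2, h3, h4, h5, h6, h7, h8, h9⟩ hok
    · by_cases hcr : c = ')'
      · subst hcr
        rw [pvOkA, if_neg (by simp [hd]), if_pos rfl, Bool.and_eq_true, decide_eq_true_eq]
          at hok
        obtain ⟨hl, hok⟩ := hok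
        have hne : a.mul ≠ [] := by
          intro h0; rw [h0] at hl; simp at hl
        have hm : a.mul = pvMulOf b.stack := by
          rcases h5 with h | ⟨hnil, _⟩
          · exact h
          · exact absurd hnil hne
        have hk : pvStepA a ')' =
            ⟨a.resD, a.mul ++ [a.mul.getLast hne *
                (if a.mulStr ≠ [] then pvInt a.mulStr else 1)], [], a.curF, a.cMul⟩ := by
          have hg : PySem.List.pyGetD a.mul (-1) 0 = a.mul.getLast hne :=
            PySem.List.pyGetD_neg_one a.mul 0 hne
          by_cases h0 : a.mulStr = [] <;> simp [pvStepA, hd, h0, hg]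
        have hkB : pvStepB b ')' =
            ⟨(PySem.Dict.empty, (if b.num ≠ [] then pvInt b.num else 1)) :: b.stack,
              [], b.name⟩ := by
          simp [pvStepB, hd]
        rw [hk, hkB]
        have hlast : a.mul.getLast hne = pvMlast b.stack := by
          have hq := pvMulOf_getLast? b.stack h4
          rw [← hm, List.getLast?_eq_some_getLast (h := hne)] at hq
          exact Option.some.inj hq
        refine ih _ _ ⟨by simp [h1], h2, h3, by simp, Or.inl ?_, ?_, ?_, h8, ?_⟩ ?_
        · rw [pvMulOf_cons _ _ h4, ← hm, hlast, h1]
        · intro key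
          cases hb : b.stack with
          | nil => exact absurd hb h4
          | cons q t =>
            rw [show pvFlatV ((PySem.Dict.empty, if b.num ≠ [] then pvInt b.num else 1)
                :: q :: t) key = pvFlatV (q :: t) key +
                pvMlast (q :: t) * (if b.num ≠ [] then pvInt b.num else 1) *
                  (PySem.Dict.empty : PySem.Dict (List Char) Int).getD key 0 from rfl,
              PySem.Dict.getD_empty]
            rw [mul_zero, add_zero, ← hb]
            exact h6 key
        · intro key
          cases hb : b.stack with
          | nil => exact absurd hb h4
          | cons q t =>
            rw [show pvFlatC ((PySem.Dict.empty, if b.num ≠ [] then pvInt b.num else 1)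
                :: q :: t) key = (pvFlatC (q :: t) key ||
                (PySem.Dict.empty : PySem.Dict (List Char) Int).contains key) from rfl]
            have he : (PySem.Dict.empty : PySem.Dict (List Char) Int).contains key = false := by
              simp [PySem.Dict.contains, PySem.Dict.empty]
            rw [he, Bool.or_false, ← hb]
            exact h7 key
        · intro p hp
          rcases List.mem_cons.mp hp with rfl | hp2
          · simp [PySem.Dict.keys, PySem.Dict.empty]
          · exact h9 p hp2
        · simpa using hok
      · by_cases hcl : c = '('
        · subst hcl
          rw [pvOkA, if_neg (by simp [hd]), if_neg (by decide), if_pos rfl] at hok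
          have hA : pvStepA a '(' = { a with mul := a.mul.dropLast } := by
            simp [pvStepA, hd, PySem.List.slice_to_neg_one]
          rw [hA]
          cases hb : b.stack with
          | nil => exact absurd hb h4
          | cons p rest =>
            obtain ⟨pd, pk⟩ := p
            cases rest with
            | nil =>
              have hB : pvStepB b '(' = b := by
                simp [pvStepB, hd, hb]
              rw [hB]
              have hmul : a.mul.dropLast = [] := by
                rcases h5 with h | ⟨hnil, _⟩
                · rw [h, hb]; rfl
                · rw [hnil]; rfl
              refine ih _ _ ⟨h1, h2, h3, h4, Or.inr ⟨hmul, (pd, pk), hb⟩,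
                h6, h7, h8, h9⟩ ?_
              have hlen : a.mul.dropLast.length = a.mul.length - 1 := by
                simp [List.length_dropLast]
              rw [hlen]
              exact hok
            | cons q t =>
              obtain ⟨qd, qk⟩ := q
              have hm : a.mul = pvMulOf b.stack := by
                rcases h5 with h | ⟨_, p', hp'⟩
                · exact h
                · rw [hb] at hp'; simp at hp'
              have hB : pvStepB b '(' =
                  { b with stack := (pvMergeInto pd pk qd, qk) :: t } := by
                simp [pvStepB, hd, hb]
              rw [hB]
              obtain ⟨sv, sc, sn⟩ := pvMergeStack pd pk qd qk t
                (h9 (pd, pk) (by simp [hb])) (h9 (qd, qk) (by simp [hb]))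
              have hmul : a.mul.dropLast = pvMulOf ((pvMergeInto pd pk qd, qk) :: t) := by
                rw [hm, hb, show pvMulOf ((pd, pk) :: (qd, qk) :: t) =
                  pvMulOf ((qd, qk) :: t) ++ [pvMlast ((qd, qk) :: t) * pk] from rfl,
                  List.dropLast_concat]
                exact pvMulOf_head qd (pvMergeInto pd pk qd) qk t
              refine ih _ _ ⟨h1, h2, h3, by simp, Or.inl hmul,
                fun key => by rw [h6 key, hb, ← sv key],
                fun key => by rw [h7 key, hb, ← sc key], h8, ?_⟩ ?_
              · intro p hp
                rcases List.mem_cons.mp hp with rfl | hp2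
                · exact sn
                · exact h9 p (by simp [hb, hp2])
              · have hlen : a.mul.dropLast.length = a.mul.length - 1 := by
                  simp [List.length_dropLast]
                rw [hlen]
                exact hok
        · by_cases hup : PySem.Chars.isupper c = true
          · rw [pvOkA, if_neg (by simp [hd]), if_neg hcr, if_neg hcl, if_pos hup,
              Bool.and_eq_true, decide_eq_true_eq] at hok
            obtain ⟨hl, hok⟩ := hok
            have hne : a.mul ≠ [] := by
              intro h0; rw [h0] at hl; simp at hl
            have hm : a.mul = pvMulOf b.stack := by
              rcases h5 with h | ⟨hnil, _⟩
              · exact h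
              · exact absurd hnil hne
            have hlast : a.mul.getLast hne = pvMlast b.stack := by
              have hq := pvMulOf_getLast? b.stack h4
              rw [← hm, List.getLast?_eq_some_getLast (h := hne)] at hq
              exact Option.some.inj hq
            have hA : pvStepA a c =
                { resD := a.resD.insert (c :: a.curF) (a.resD.getD (c :: a.curF) 0 +
                    a.mul.getLast hne * (if a.mulStr ≠ [] then pvInt a.mulStr else 1)),
                  mul := a.mul, mulStr := [], curF := [], cMul := 1 } := by
              have hg : PySem.List.pyGetD a.mul (-1) 0 = a.mul.getLast hne :=
                PySem.List.pyGetD_neg_one a.mul 0 hne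
              rw [pvStepA]
              simp only [hd, Bool.false_eq_true, if_false, if_neg hcr, if_neg hcl, hup,
                if_true]
              rw [pvAIf, hg, h3]
            cases hb : b.stack with
            | nil => exact absurd hb h4
            | cons p rest =>
              obtain ⟨pd, pk⟩ := p
              have hB : pvStepB b c =
                  ⟨(pd.insert (c :: b.name) (pd.getD (c :: b.name) 0 +
                      (if b.num ≠ [] then pvInt b.num else 1)), pk) :: rest,
                    [], []⟩ := by
                rw [pvStepB]
                simp only [hd, Bool.false_eq_true, if_false, if_neg hcr, if_neg hcl, hup,
                  if_true, hb]
              rw [hA, hB]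
              obtain ⟨fv, fc⟩ := pvFlat_insert_head pd pk rest (c :: b.name)
                (if b.num ≠ [] then pvInt b.num else 1)
              obtain ⟨uv, uc, un⟩ := pvUpd a.resD (c :: a.curF)
                (a.mul.getLast hne * (if a.mulStr ≠ [] then pvInt a.mulStr else 1))
              refine ih _ _ ⟨rfl, rfl, rfl, by simp, Or.inl ?_, ?_, ?_, un h8, ?_⟩ ?_
              · rw [hm, hb]
                exact pvMulOf_head pd _ pk rest
              · intro key
                rw [uv key, fv key, h6 key, hb, h1, h2]
                have hml : pvMlast ((pd, pk) :: rest) = a.mul.getLast hne := by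
                  rw [hlast, hb]
                rw [hml]
              · intro key
                rw [uc key, fc key, h7 key, hb, h2]
              · intro p hp
                rcases List.mem_cons.mp hp with rfl | hp2
                · obtain ⟨_, _, pn⟩ := pvUpd pd (c :: b.name)
                    (if b.num ≠ [] then pvInt b.num else 1)
                  exact pn (h9 (pd, pk) (by simp [hb]))
                · exact h9 p (by simp [hb, hp2])
              · simpa using hok
          · rw [pvOkA, if_neg (by simp [hd]), if_neg hcr, if_neg hcl,
              if_neg (by simp [hup])] at hok
            have hA : pvStepA a c = { a with curF := c :: a.curF } := by
              rw [pvStepA]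
              simp only [hd, Bool.false_eq_true, if_false, if_neg hcr, if_neg hcl, hup]
            have hB : pvStepB b c = { b with name := c :: b.name } := by
              rw [pvStepB]
              simp only [hd, Bool.false_eq_true, if_false, if_neg hcr, if_neg hcl, hup]
            rw [hA, hB]
            exact ih _ _ ⟨h1, by simp [h2], h3, h4, h5, h6, h7, h8, h9⟩ hok

-- ========== the final cascade keeps the flattened view ==========
theorem pvCascade_props : ∀ (s : List (PySem.Dict (List Char) Int × Int)), s ≠ [] →
    (∀ p ∈ s, (p.1).keys.Nodup) →
    (∀ key, (pvCascade s).getD key 0 = pvFlatV s key) ∧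
    (∀ key, (pvCascade s).contains key = pvFlatC s key) ∧ (pvCascade s).keys.Nodup
  | [], h, _ => absurd rfl h
  | [(d, k)], _, hn =>
    ⟨fun key => by rw [pvCascade_single]; rfl, fun key => by rw [pvCascade_single]; rfl,
      by rw [pvCascade_single]; exact hn (d, k) (by simp)⟩
  | (pd, pk) :: (qd, qk) :: rest, _, hn => by
    obtain ⟨sv, sc, sn⟩ := pvMergeStack pd pk qd qk rest
      (hn (pd, pk) (by simp)) (hn (qd, qk) (by simp))
    obtain ⟨cv, cc, cn⟩ := pvCascade_props ((pvMergeInto pd pk qd, qk) :: rest) (by simp)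
      (by
        intro p hp
        rcases List.mem_cons.mp hp with rfl | hp2
        · exact sn
        · exact hn p (by simp [hp2]))
    refine ⟨?_, ?_, ?_⟩
    · intro key
      rw [pvCascade_cons, cv key, sv key]
    · intro key
      rw [pvCascade_cons, cc key, sc key]
    · rw [pvCascade_cons]
      exact cn
termination_by s _ _ => s.length
decreasing_by simp

-- ===== VERDICT (by name: the statement is the Claim_ definition above) =====
theorem countOfAtoms_spec : Claim_equal_countOfAtoms := by
  unfold Claim_equal_countOfAtoms
  intro formula _hdom hpre
  unfold Spec_countOfAtoms
  have hinv0 : pvInv ⟨PySem.Dict.empty, [1], [], [], 1⟩ ⟨[(PySem.Dict.empty, 1)], [], []⟩ := by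
    refine ⟨rfl, rfl, rfl, by simp, Or.inl rfl, fun key => rfl, fun key => rfl, ?_, ?_⟩
    · simp [PySem.Dict.keys, PySem.Dict.empty]
    · intro p hp
      rcases List.mem_cons.mp hp with rfl | hp2
      · simp [PySem.Dict.keys, PySem.Dict.empty]
      · simp at hp2
  have hsim := pvSim formula.toList.reverse _ _ hinv0 (by exact hpre)
  obtain ⟨_, _, _, g4, _, g6, g7, g8, g9⟩ := hsim
  obtain ⟨cv, cc, cn⟩ := pvCascade_props _ g4 g9
  unfold countOfAtoms countOfAtoms_alt
  exact pvFormat_congr _ _ g8 cn (fun k => by rw [g7 k, cc k]) (fun k => by rw [g6 k, cv k])
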